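-- pv_equiv track=rewrite | github.com/dokyun-kim4/leetcode | two pointer/350.py | answer
-- ===== SOURCE A (Python) =====
-- def answer(nums1, nums2):
--
--     nums1.sort()
--     nums2.sort()
--     soln = []
--     i, j = 0, 0
--
--     while i < len(nums1) and j < len(nums2):
--
--         if nums1[i] == nums2[j]:
--             soln.append(nums1[i])
--             i += 1
--             j += 1
--         elif nums1[i] > nums2[j]:
--             j += 1
--         elif nums1[i] < nums2[j]:
--             i += 1
--
--     return soln
-- ===== SOURCE B (Python) =====
-- def answer(nums1, nums2):
--     nums1.sort()
--     nums2.sort()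
--     counts = {}
--     for x in nums2:
--         counts[x] = counts.get(x, 0) + 1
--     soln = []
--     for x in nums1:
--         if counts.get(x, 0) > 0:
--             soln.append(x)
--             counts[x] -= 1
--     return soln
-- ===== Notes on version B (the rewrite author's own statement) =====
-- stated objective: alternative
-- what changed: Replaces the synchronized two-pointer merge over the two sorted lists with a count dictionary built from nums2 and a single counting pass over sorted nums1 (append x and decrement while its count is positive).
import Mathlib
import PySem

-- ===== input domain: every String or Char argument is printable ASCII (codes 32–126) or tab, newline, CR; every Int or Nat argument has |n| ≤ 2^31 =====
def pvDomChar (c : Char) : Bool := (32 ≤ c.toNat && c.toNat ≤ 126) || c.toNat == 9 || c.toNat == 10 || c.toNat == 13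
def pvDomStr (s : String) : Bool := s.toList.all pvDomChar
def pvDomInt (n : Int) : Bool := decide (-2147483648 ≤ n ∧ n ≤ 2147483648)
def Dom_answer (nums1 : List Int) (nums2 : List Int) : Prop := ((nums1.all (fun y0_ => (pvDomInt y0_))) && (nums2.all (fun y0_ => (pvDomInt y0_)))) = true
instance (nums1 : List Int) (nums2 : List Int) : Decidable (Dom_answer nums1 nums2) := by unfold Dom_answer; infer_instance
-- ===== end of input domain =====

-- B replaces A's two-pointer merge by a count-dictionary pass over sorted nums1.
-- Both Pythons sort nums1 and nums2 in place; the equivalence proved here is about the RETURN value.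

-- ===== PORT A =====
-- A's while-loop over indices i, j with an accumulator soln.  Python's final branch is
-- 'elif nums1[i] < nums2[j]', which always fires when the first two tests fail (trichotomy),
-- so it is ported as the final 'else'.
def answerLoop (s t : List Int) : Nat → Nat → Nat → List Int → List Int
  | 0, _, _, soln => soln
  | fuel + 1, i, j, soln =>
    if h : i < s.length ∧ j < t.length then
      if s[i] = t[j] then answerLoop s t fuel (i+1) (j+1) (soln ++ [s[i]])
      else if s[i] > t[j] then answerLoop s t fuel i (j+1) soln
      else answerLoop s t fuel (i+1) j soln
    else soln

def answer (nums1 : List Int) (nums2 : List Int) : List Int :=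
  let s := PySem.List.sorted nums1 (fun x => x) false
  let t := PySem.List.sorted nums2 (fun x => x) false
  answerLoop s t (s.length + t.length) 0 0 []

-- ===== PORT B =====
def answer_alt (nums1 : List Int) (nums2 : List Int) : List Int :=
  let s := PySem.List.sorted nums1 (fun x => x) false
  let t := PySem.List.sorted nums2 (fun x => x) false
  let counts := t.foldl (fun (d : PySem.Dict Int Int) x => d.insert x (d.getD x 0 + 1)) PySem.Dict.empty
  (s.foldl (fun (p : PySem.Dict Int Int × List Int) x =>
      if p.1.getD x 0 > 0 then (p.1.insert x (p.1.getD x 0 - 1), p.2 ++ [x]) else p)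
    (counts, [])).2

-- ===== PRECONDITION & SPEC =====
def Spec_answer (nums1 : List Int) (nums2 : List Int) (out : List Int) : Prop := out = answer_alt nums1 nums2
instance (nums1 : List Int) (nums2 : List Int) (out : List Int) : Decidable (Spec_answer nums1 nums2 out) := by unfold Spec_answer; infer_instance

-- ===== CLAIM (what is proved, stated in full; the proofs are below) =====
def Claim_equal_answer : Prop := ∀ (nums1 : List Int) (nums2 : List Int), Dom_answer nums1 nums2 → Spec_answer nums1 nums2 (answer nums1 nums2)

-- ===== LEMMAS AND PROOFS =====

-- pure two-pointer merge (A's loop, freed from indices)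
def tp : List Int → List Int → List Int
  | [], _ => []
  | _ :: _, [] => []
  | a :: s, b :: t =>
    if a = b then a :: tp s t
    else if a > b then tp (a :: s) (b :: t).tail
    else tp s (b :: t)
termination_by s t => s.length + t.length

-- B's pass, abstracted over the remaining-count function
def gof : List Int → (Int → Int) → List Int
  | [], _ => []
  | x :: s, f => if f x > 0 then x :: gof s (Function.update f x (f x - 1)) else gof s f

lemma answerLoop_eq (s t : List Int) (fuel i j : Nat) (soln : List Int)
    (hf : (s.length - i) + (t.length - j) ≤ fuel) :
    answerLoop s t fuel i j soln = soln ++ tp (s.drop i) (t.drop j) := by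
  induction fuel generalizing i j soln with
  | zero =>
      have hi : s.length ≤ i := by omega
      have hj : t.length ≤ j := by omega
      rw [answerLoop, List.drop_eq_nil_of_le hi, tp]
      simp
  | succ fuel ih =>
      rw [answerLoop]
      by_cases h : i < s.length ∧ j < t.length
      · rw [dif_pos h]
        by_cases h1 : s[i] = t[j]
        · rw [if_pos h1, ih _ _ _ (by omega),
            List.drop_eq_getElem_cons h.1, List.drop_eq_getElem_cons h.2, tp, if_pos h1]
          simp
        · by_cases h2 : s[i] > t[j]
          · rw [if_neg h1, if_pos h2, ih _ _ _ (by omega),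
              List.drop_eq_getElem_cons h.1, List.drop_eq_getElem_cons h.2, tp,
              if_neg h1, if_pos h2, List.tail_cons]
          · rw [if_neg h1, if_neg h2, ih _ _ _ (by omega),
              List.drop_eq_getElem_cons h.1, List.drop_eq_getElem_cons h.2, tp,
              if_neg h1, if_neg h2]
      · rw [dif_neg h]
        rcases Nat.lt_or_ge i s.length with hi | hi
        · have hj : t.length ≤ j := by omega
          rw [List.drop_eq_nil_of_le hj, List.drop_eq_getElem_cons hi, tp]
          simp
        · rw [List.drop_eq_nil_of_le hi, tp]
          simp

lemma bfold (s : List Int) (c : PySem.Dict Int Int) (acc : List Int) :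
    (s.foldl (fun (p : PySem.Dict Int Int × List Int) x =>
        if p.1.getD x 0 > 0 then (p.1.insert x (p.1.getD x 0 - 1), p.2 ++ [x]) else p)
      (c, acc)).2 = acc ++ gof s (fun x => c.getD x 0) := by
  induction s generalizing c acc with
  | nil => simp [gof]
  | cons x s ih =>
      rw [List.foldl_cons, gof]
      by_cases hx : c.getD x 0 > 0
      · rw [if_pos hx, if_pos hx, ih]
        have hupd : (fun y => (c.insert x (c.getD x 0 - 1)).getD y 0)
            = Function.update (fun y => c.getD y 0) x (c.getD x 0 - 1) := by
          funext y
          rw [PySem.Dict.getD_insert]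
          by_cases hy : y = x <;> simp [hy, Function.update]
        rw [hupd]
        simp
      · rw [if_neg hx, if_neg hx, ih]

lemma gof_congr (s : List Int) (f g : Int → Int) (h : ∀ x ∈ s, f x = g x) :
    gof s f = gof s g := by
  induction s generalizing f g with
  | nil => rfl
  | cons x s ih =>
      have hx : f x = g x := h x (List.mem_cons_self ..)
      rw [gof, gof, hx]
      by_cases hp : g x > 0
      · rw [if_pos hp, if_pos hp, ih]
        intro y hy
        by_cases hyx : y = x <;> simp [hyx, Function.update, h y (List.mem_cons_of_mem _ hy)]
      · rw [if_neg hp, if_neg hp, ih]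
        exact fun y hy => h y (List.mem_cons_of_mem _ hy)

lemma gof_nil_counts (s : List Int) (f : Int → Int) (h : ∀ x ∈ s, f x ≤ 0) : gof s f = [] := by
  induction s generalizing f with
  | nil => rfl
  | cons x s ih =>
      rw [gof, if_neg (by have := h x (List.mem_cons_self ..); omega)]
      exact ih f fun y hy => h y (List.mem_cons_of_mem _ hy)

lemma tp_eq_gof_aux : ∀ (n : Nat) (s t : List Int), s.length + t.length = n →
    s.Pairwise (· ≤ ·) → t.Pairwise (· ≤ ·) → gof s (fun x => (t.count x : Int)) = tp s t := by
  intro n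
  induction n using Nat.strong_induction_on with
  | _ n ih =>
  intro s t hn hs ht
  match s, t with
  | [], t => rw [tp]; rfl
  | a :: s, [] =>
      rw [tp, gof_nil_counts]
      intro x _; simp
  | a :: s, b :: t =>
      have has : ∀ y ∈ s, a ≤ y := (List.pairwise_cons.mp hs).1
      have hbt : ∀ y ∈ t, b ≤ y := (List.pairwise_cons.mp ht).1
      rcases lt_trichotomy a b with hab | hab | hab
      · -- a < b: count of a in b :: t is 0
        have hca : (b :: t).count a = 0 := by
          rw [List.count_eq_zero]
          intro hmem
          rcases List.mem_cons.mp hmem with h | h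
          · omega
          · have := hbt a h; omega
        rw [gof, if_neg (by simp [hca]), tp, if_neg (by omega), if_neg (by omega)]
        exact ih (s.length + (b :: t).length) (by simp at hn ⊢; omega) s (b :: t) rfl
          (List.Pairwise.of_cons hs) ht
      · -- a = b
        subst hab
        have hca : (0 : Int) < ((a :: t).count a : Int) := by
          have : 0 < (a :: t).count a := List.count_pos_iff.mpr (List.mem_cons_self ..)
          exact_mod_cast this
        rw [gof, if_pos hca, tp, if_pos rfl]
        congr 1
        have : Function.update (fun x => ((a :: t).count x : Int)) a (((a :: t).count a : Int) - 1)
            = fun x => (t.count x : Int) := by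
          funext x
          by_cases hx : x = a
          · subst hx; simp [Function.update, List.count_cons_self]
          · simp [Function.update, hx, Ne.symm hx]
        rw [this]
        exact ih (s.length + t.length) (by simp at hn ⊢; omega) s t rfl
          (List.Pairwise.of_cons hs) (List.Pairwise.of_cons ht)
      · -- a > b: drop b from t; counts seen by a :: s are unchanged
        rw [tp, if_neg (by omega), if_pos hab]
        have hcongr : gof (a :: s) (fun x => ((b :: t).count x : Int))
            = gof (a :: s) (fun x => (t.count x : Int)) := by
          apply gof_congr
          intro x hx
          have hax : a ≤ x := by
            rcases List.mem_cons.mp hx with h | h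
            · omega
            · exact has x h
          have : x ≠ b := by omega
          simp [Ne.symm this]
        rw [hcongr]
        exact ih ((a :: s).length + t.length) (by simp at hn ⊢; omega) (a :: s) t rfl hs
          (List.Pairwise.of_cons ht)

lemma tp_eq_gof (s t : List Int) (hs : s.Pairwise (· ≤ ·)) (ht : t.Pairwise (· ≤ ·)) :
    gof s (fun x => (t.count x : Int)) = tp s t :=
  tp_eq_gof_aux (s.length + t.length) s t rfl hs ht

-- ===== VERDICT (by name: the statement is the Claim_ definition above) =====
theorem answer_spec : Claim_equal_answer := by
  intro nums1 nums2 _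
  unfold Spec_answer answer answer_alt
  simp only []
  rw [PySem.Dict.foldl_insert_getD_add_one_eq_counter, bfold, answerLoop_eq _ _ _ _ _ _ (by omega)]
  simp only [List.drop_zero, List.nil_append]
  have hc : (fun x => (PySem.Dict.counter (PySem.List.sorted nums2 (fun x => x) false)).getD x 0)
      = fun x => (((PySem.List.sorted nums2 (fun x => x) false).count x : Nat) : Int) := by
    funext x; rw [PySem.Dict.getD_counter]
  rw [hc, tp_eq_gof]
  · exact PySem.List.sorted_pairwise nums1 (fun x => x)
  · exact PySem.List.sorted_pairwise nums2 (fun x => x)
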